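-- pv_equiv track=rewrite | github.com/Akamemz/King_Pieces_demo | app/pages/new_ver_king_chessboard_app.py | vertical_strips
-- ===== SOURCE A (Python) =====
-- from typing import Dict, List, Tuple
--
-- Region = Tuple[int, int, int, int]  # (r0, r1, c0, c1)
--
-- def vertical_strips(n: int, k: int) -> List[Region]:
--     if k <= 0:
--         return []
--     moats = k - 1
--     usable = n - moats
--     if usable <= 0:
--         return []
--     base_w, extra = divmod(usable, k)
--     widths = [base_w + (1 if i < extra else 0) for i in range(k)]
--
--     regions: List[Region] = []
--     c = 0
--     for w in widths:
--         c0 = c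
--         c1 = c0 + w - 1
--         regions.append((0, n - 1, c0, c1))
--         c = c1 + 2  # moat column
--     return regions
-- ===== SOURCE B (Python) =====
-- from typing import Dict, List, Tuple
--
-- Region = Tuple[int, int, int, int]  # (r0, r1, c0, c1)
--
-- def vertical_strips(n: int, k: int) -> List[Region]:
--     if k <= 0:
--         return []
--     usable = n - (k - 1)
--     if usable <= 0:
--         return []
--     base_w, extra = divmod(usable, k)
--     # the first `extra` strips are one wider; with their moat each occupies a
--     # fixed pitch, so both homogeneous blocks are closed-form comprehensions
--     pitch = base_w + 2                      # wide strip + moat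
--     first = [(0, n - 1, i * pitch, i * pitch + base_w) for i in range(extra)]
--     off = extra * pitch
--     rest = [(0, n - 1, off + j * (base_w + 1), off + j * (base_w + 1) + base_w - 1)
--             for j in range(k - extra)]
--     return first + rest
-- ===== Notes on version B (the rewrite author's own statement) =====
-- stated objective: alternative
-- what changed: Replaced A's widths list plus accumulator-threaded cursor fold with two closed-form block comprehensions: the first `extra` wide strips occupy a fixed pitch base_w+2, the remaining narrow strips a pitch base_w+1, so every region is computed directly from its block index with no running cursor.
import Mathlib
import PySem

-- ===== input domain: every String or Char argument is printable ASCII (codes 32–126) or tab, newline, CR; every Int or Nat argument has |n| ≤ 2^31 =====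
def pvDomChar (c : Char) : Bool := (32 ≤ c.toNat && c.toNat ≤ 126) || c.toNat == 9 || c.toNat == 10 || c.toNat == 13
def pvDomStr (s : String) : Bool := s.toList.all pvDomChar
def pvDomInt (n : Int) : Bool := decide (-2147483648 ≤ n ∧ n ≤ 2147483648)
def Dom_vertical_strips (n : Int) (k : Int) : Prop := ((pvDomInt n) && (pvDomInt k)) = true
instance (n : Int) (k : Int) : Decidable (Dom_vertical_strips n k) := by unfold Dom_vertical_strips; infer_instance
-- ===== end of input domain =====

-- B replaces A's widths list + cursor-threaded fold by two closed-form block comprehensions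
-- (wide strips at pitch base_w+2, then narrow strips at pitch base_w+1); objective: alternative.
-- ===== PORT A =====
def vertical_strips (n : Int) (k : Int) : List (Int × Int × Int × Int) :=
  if k ≤ 0 then []
  else
    let moats := k - 1
    let usable := n - moats
    if usable ≤ 0 then []
    else
      let base_w := PySem.Int.floordiv usable k
      let extra := PySem.Int.mod usable k
      let widths := (PySem.List.pyRange 0 k 1).map (fun i => base_w + (if i < extra then 1 else 0))
      (widths.foldl
        (fun (st : List (Int × Int × Int × Int) × Int) w =>
          let c0 := st.2
          let c1 := c0 + w - 1
          (st.1 ++ [(0, n - 1, c0, c1)], c1 + 2))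
        ([], 0)).1

-- ===== PORT B =====
-- Python's range(m) over nonnegative m is List.range m.toNat
def vertical_strips_alt (n : Int) (k : Int) : List (Int × Int × Int × Int) :=
  if k ≤ 0 then []
  else
    let usable := n - (k - 1)
    if usable ≤ 0 then []
    else
      let base_w := PySem.Int.floordiv usable k
      let extra := PySem.Int.mod usable k
      let pitch := base_w + 2
      let first := (List.range extra.toNat).map
        (fun (i : Nat) => (0, n - 1, (i : Int) * pitch, (i : Int) * pitch + base_w))
      let off := extra * pitch
      let rest := (List.range (k - extra).toNat).map
        (fun (j : Nat) => (0, n - 1, off + (j : Int) * (base_w + 1),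
                           off + (j : Int) * (base_w + 1) + base_w - 1))
      first ++ rest

-- ===== PRECONDITION & SPEC =====
def Spec_vertical_strips (n : Int) (k : Int) (out : List (Int × Int × Int × Int)) : Prop := out = vertical_strips_alt n k
instance (n : Int) (k : Int) (out : List (Int × Int × Int × Int)) : Decidable (Spec_vertical_strips n k out) := by unfold Spec_vertical_strips; infer_instance

-- ===== CLAIM (what is proved, stated in full; the proofs are below) =====
def Claim_equal_vertical_strips : Prop := ∀ (n : Int) (k : Int), Dom_vertical_strips n k → Spec_vertical_strips n k (vertical_strips n k)

-- ===== LEMMAS AND PROOFS =====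

-- closed form of one strip's region under A's extras-first distribution
def vsReg (n b e : Int) (i : Int) : Int × Int × Int × Int :=
  (0, n - 1, i * b + min i e + i,
   i * b + min i e + i + (b + (if i < e then 1 else 0)) - 1)

-- A's loop invariant: after m strips the accumulator holds the closed-form regions
-- and the cursor sits at m*base_w + min m extra + m.
theorem vertical_strips_loop (n base_w extra : Int) (he : 0 ≤ extra) (m : Nat) :
    (((PySem.List.pyRange 0 (m : Int) 1).map
        (fun i => base_w + (if i < extra then 1 else 0))).foldl
      (fun (st : List (Int × Int × Int × Int) × Int) w =>
        (st.1 ++ [(0, n - 1, st.2, st.2 + w - 1)], st.2 + w - 1 + 2))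
      ([], 0))
    = ((PySem.List.pyRange 0 (m : Int) 1).map (vsReg n base_w extra),
       (m : Int) * base_w + min (m : Int) extra + (m : Int)) := by
  induction m with
  | zero => simp [PySem.List.pyRange_one_eq_nil]; omega
  | succ m ih =>
    have hsplit : PySem.List.pyRange 0 ((m : Int) + 1) 1
        = PySem.List.pyRange 0 (m : Int) 1 ++ [(m : Int)] :=
      PySem.List.pyRange_one_succ_right (by exact_mod_cast Int.natCast_nonneg m)
    push_cast
    rw [hsplit, List.map_append, List.foldl_append, List.map_append, ih]
    simp only [List.map_cons, List.map_nil, List.foldl_cons, List.foldl_nil, vsReg]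
    rw [Prod.mk.injEq]
    refine ⟨?_, ?_⟩
    · by_cases h : (m : Int) < extra <;> simp [h]
    · by_cases h : (m : Int) < extra <;> simp [h, add_one_mul] <;> omega

-- ===== VERDICT (by name: the statement is the Claim_ definition above) =====
theorem vertical_strips_spec : Claim_equal_vertical_strips := by
  intro n k _
  unfold Spec_vertical_strips vertical_strips vertical_strips_alt
  by_cases hk : k ≤ 0
  · simp [hk]
  · simp only [hk, if_false]
    by_cases hu : n - (k - 1) ≤ 0
    · simp [hu]
    · simp only [hu, if_false]
      have hkpos : 0 < k := by omega
      set u : Int := n - (k - 1) with hu_def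
      set b : Int := PySem.Int.floordiv u k with hb
      set e : Int := PySem.Int.mod u k with he_def
      have hmod : e = u % k := by rw [he_def, PySem.Int.mod_eq_emod_of_pos hkpos]
      have he0 : 0 ≤ e := by rw [hmod]; exact Int.emod_nonneg _ (by omega)
      have hek : e < k := by rw [hmod]; exact Int.emod_lt_of_pos _ hkpos
      have hk' : ((k.toNat : Nat) : Int) = k := by omega
      have hA := vertical_strips_loop n b e he0 k.toNat
      rw [hk'] at hA
      have hA1 : (((PySem.List.pyRange 0 k 1).map
            (fun i => b + (if i < e then 1 else 0))).foldl
          (fun (st : List (Int × Int × Int × Int) × Int) w =>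
            (st.1 ++ [(0, n - 1, st.2, st.2 + w - 1)], st.2 + w - 1 + 2))
          ([], 0)).1 = (PySem.List.pyRange 0 k 1).map (vsReg n b e) := by rw [hA]
      rw [hA1]
      -- split A's index range at `extra`: wide block, then narrow block
      rw [PySem.List.pyRange_one_append 0 e k he0 (le_of_lt hek), List.map_append]
      congr 1
      · rw [show PySem.List.pyRange 0 e 1
              = (List.range e.toNat).map (fun (i : Nat) => (i : Int)) by
            simpa using PySem.List.pyRange_one 0 e, List.map_map]
        apply List.map_congr_left
        intro i hi
        have hi' : (i : Int) < e := by
          have := List.mem_range.mp hi; omega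
        have hi0 : (0 : Int) ≤ (i : Int) := Int.natCast_nonneg i
        simp only [Function.comp, vsReg, if_pos hi']
        rw [Prod.mk.injEq, Prod.mk.injEq, Prod.mk.injEq]
        have hmin : min (i : Int) e = (i : Int) := by omega
        refine ⟨rfl, rfl, ?_, ?_⟩ <;> (rw [hmin]; ring)
      · rw [show PySem.List.pyRange e k 1
              = (List.range (k - e).toNat).map (fun (j : Nat) => e + (j : Int)) by
            simpa using PySem.List.pyRange_one e k, List.map_map]
        apply List.map_congr_left
        intro j _
        have hj0 : (0 : Int) ≤ (j : Int) := Int.natCast_nonneg j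
        have hnlt : ¬ (e + (j : Int) < e) := by omega
        simp only [Function.comp, vsReg, if_neg hnlt]
        rw [Prod.mk.injEq, Prod.mk.injEq, Prod.mk.injEq]
        have hmin : min (e + (j : Int)) e = e := by omega
        refine ⟨rfl, rfl, ?_, ?_⟩ <;> (rw [hmin]; ring)
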